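-- pv_equiv track=rewrite | github.com/callmexss/offer | src/netease/words-puzzle.py | find_word_diagonal
-- ===== SOURCE A (Python) =====
-- def find_word_diagonal(matrix, word, i, j, k):
--     if (i >= len(matrix) or
--         j >= len(matrix[0]) or
--         k >= len(word) or
--         matrix[i][j] != word[k]):
--         return False
--
--     if k == len(word) - 1:
--         return True
--
--     return find_word_diagonal(matrix, word, i+1, j+1, k+1)
-- ===== SOURCE B (Python) =====
-- def find_word_diagonal(matrix, word, i, j, k):
--     n = len(word) - k
--     if n <= 0 or i + n > len(matrix) or j + n > len(matrix[0]):
--         return False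
--     return all(matrix[i + t][j + t] == word[k + t] for t in range(n))
-- ===== Notes on version B (the rewrite author's own statement) =====
-- stated objective: alternative
-- what changed: Replaces the per-step guarded tail recursion by a single up-front bounds check on the remaining word length followed by an all() scan over range(n); the per-step boundary tests disappear because the bound checks are monotone along the diagonal.
-- outside the precondition, e.g. on find_word_diagonal([['a']], 'a', -1, -1, -1): A returns True, B returns True; on find_word_diagonal([['a', 'b'], ['c']], 'ab', 0, 0, 0): A raises IndexError, B raises IndexError; on find_word_diagonal([['a', 'b'], ['c']], 'zz', 0, 0, 0): A returns False, B returns False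
import Mathlib
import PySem

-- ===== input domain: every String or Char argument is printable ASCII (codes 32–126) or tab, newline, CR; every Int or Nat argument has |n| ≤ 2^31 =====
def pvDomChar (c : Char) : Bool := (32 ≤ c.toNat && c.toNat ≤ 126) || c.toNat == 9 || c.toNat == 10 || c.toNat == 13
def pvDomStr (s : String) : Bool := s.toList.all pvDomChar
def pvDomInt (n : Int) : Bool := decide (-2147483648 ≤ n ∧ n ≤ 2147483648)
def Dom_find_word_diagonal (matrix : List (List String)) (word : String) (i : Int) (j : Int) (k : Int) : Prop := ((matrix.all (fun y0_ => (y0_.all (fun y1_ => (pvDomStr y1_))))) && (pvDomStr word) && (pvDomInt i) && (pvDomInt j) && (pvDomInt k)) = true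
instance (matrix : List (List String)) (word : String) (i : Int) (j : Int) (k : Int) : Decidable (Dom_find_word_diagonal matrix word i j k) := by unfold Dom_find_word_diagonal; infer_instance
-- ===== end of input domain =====

-- B replaces A's per-step guarded tail recursion by one up-front bounds check plus an all() scan
-- over the remaining word length (objective: alternative decomposition, same cost).


-- ===== PORT A =====
-- matrix[i][j] as a list of code points (exact Python indexing via pyGetD; used only in-range under Pre_)
def pvCell (matrix : List (List String)) (i j : Int) : List Char :=
  (PySem.List.pyGetD (PySem.List.pyGetD matrix i []) j "").toList

-- word[k]: the one-character string Python returns, as a list of code points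
def pvWordAt (word : String) (k : Int) : List Char :=
  match PySem.Str.pyGet? word k with
  | some c => [c]
  | none => []

def find_word_diagonal (matrix : List (List String)) (word : String) (i : Int) (j : Int) (k : Int) : Bool :=
  if h : i ≥ (matrix.length : Int) ∨ j ≥ ((PySem.List.pyGetD matrix 0 []).length : Int) ∨
         k ≥ PySem.Str.len word ∨ pvCell matrix i j ≠ pvWordAt word k then
    false
  else if k = PySem.Str.len word - 1 then
    true
  else
    find_word_diagonal matrix word (i+1) (j+1) (k+1)
termination_by (PySem.Str.len word - k).toNat
decreasing_by
  push_neg at h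
  obtain ⟨-, -, hk, -⟩ := h
  omega

-- ===== PORT B =====
def find_word_diagonal_alt (matrix : List (List String)) (word : String) (i : Int) (j : Int) (k : Int) : Bool :=
  let n := PySem.Str.len word - k
  if n ≤ 0 ∨ i + n > (matrix.length : Int) ∨ j + n > ((PySem.List.pyGetD matrix 0 []).length : Int) then
    false
  else
    (PySem.List.pyRange 0 n 1).all (fun t => decide (pvCell matrix (i+t) (j+t) = pvWordAt word (k+t)))

-- ===== PRECONDITION & SPEC =====
-- Pre_ admits the natural domain (nonnegative cursors, every row at least as long as row 0) plus the
-- out-of-bounds regions where A returns False before touching any cell; it excludes negative cursors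
-- inside bounds and ragged shorter rows, where A can raise IndexError mid-walk and the inputs on which
-- A does return do so via Python's negative-index wraparound, an artefact not claimed here.
def Pre_find_word_diagonal (matrix : List (List String)) (word : String) (i : Int) (j : Int) (k : Int) : Prop :=
  (0 ≤ i ∧ 0 ≤ j ∧ 0 ≤ k ∧ ∀ row ∈ matrix, (PySem.List.pyGetD matrix 0 []).length ≤ row.length)
  ∨ i ≥ (matrix.length : Int)
  ∨ (matrix ≠ [] ∧ j ≥ ((PySem.List.pyGetD matrix 0 []).length : Int))
  ∨ (k ≥ PySem.Str.len word ∧ (0 ≤ i ∨ matrix ≠ []))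
instance (matrix : List (List String)) (word : String) (i : Int) (j : Int) (k : Int) : Decidable (Pre_find_word_diagonal matrix word i j k) := by unfold Pre_find_word_diagonal; infer_instance

def pvWitness_find_word_diagonal : List (List String) × String × Int × Int × Int := ([["a"]], "a", 0, 0, 0)

def Spec_find_word_diagonal (matrix : List (List String)) (word : String) (i : Int) (j : Int) (k : Int) (out : Bool) : Prop := out = find_word_diagonal_alt matrix word i j k
instance (matrix : List (List String)) (word : String) (i : Int) (j : Int) (k : Int) (out : Bool) : Decidable (Spec_find_word_diagonal matrix word i j k out) := by unfold Spec_find_word_diagonal; infer_instance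

-- ===== CLAIM (what is proved, stated in full; the proofs are below) =====
def Claim_equal_find_word_diagonal : Prop := ∀ (matrix : List (List String)) (word : String) (i : Int) (j : Int) (k : Int), Dom_find_word_diagonal matrix word i j k → Pre_find_word_diagonal matrix word i j k → Spec_find_word_diagonal matrix word i j k (find_word_diagonal matrix word i j k)

-- ===== LEMMAS AND PROOFS =====

theorem pv_all_ext {α : Type} (l : List α) (f g : α → Bool) (h : ∀ x, f x = g x) : l.all f = l.all g := by
  have : f = g := funext h
  rw [this]

-- peel the first index off B's scan
theorem pv_all_pyRange_shift (f : Int → Bool) (n : Int) (h : 0 < n) :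
    (PySem.List.pyRange 0 n 1).all f = (f 0 && (PySem.List.pyRange 0 (n-1) 1).all (fun t => f (t+1))) := by
  rw [PySem.List.pyRange_one_cons h]
  simp only [List.all_cons]
  congr 1
  rw [Bool.eq_iff_iff]
  simp only [List.all_eq_true, PySem.List.mem_pyRange_one]
  constructor
  · intro hall x hx
    exact hall (x+1) ⟨by omega, by omega⟩
  · intro hall x hx
    have := hall (x-1) ⟨by omega, by omega⟩
    rwa [sub_add_cancel] at this

-- main equivalence, by induction on the number of remaining steps
theorem pv_main (matrix : List (List String)) (word : String) :
    ∀ (fuel : Nat) (i j k : Int), 0 ≤ i → 0 ≤ j → 0 ≤ k →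
      (PySem.Str.len word - k).toNat ≤ fuel →
      find_word_diagonal matrix word i j k = find_word_diagonal_alt matrix word i j k := by
  intro fuel
  induction fuel with
  | zero =>
    intro i j k hi hj hk hf
    rw [find_word_diagonal, dif_pos (Or.inr (Or.inr (Or.inl (by omega))))]
    rw [find_word_diagonal_alt]
    rw [if_pos (Or.inl (by omega))]
  | succ fu ih =>
    intro i j k hi hj hk hf
    by_cases hkL : k ≥ PySem.Str.len word
    · rw [find_word_diagonal, dif_pos (Or.inr (Or.inr (Or.inl hkL)))]
      rw [find_word_diagonal_alt, if_pos (Or.inl (by omega))]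
    · have hn : 0 < PySem.Str.len word - k := by omega
      by_cases him : i ≥ (matrix.length : Int)
      · rw [find_word_diagonal, dif_pos (Or.inl him)]
        rw [find_word_diagonal_alt, if_pos (Or.inr (Or.inl (by omega)))]
      · by_cases hjc : j ≥ ((PySem.List.pyGetD matrix 0 []).length : Int)
        · rw [find_word_diagonal, dif_pos (Or.inr (Or.inl hjc))]
          rw [find_word_diagonal_alt, if_pos (Or.inr (Or.inr (by omega)))]
        · by_cases hmatch : pvCell matrix i j = pvWordAt word k
          · have hguard : ¬ (i ≥ (matrix.length : Int) ∨ j ≥ ((PySem.List.pyGetD matrix 0 []).length : Int) ∨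
                k ≥ PySem.Str.len word ∨ pvCell matrix i j ≠ pvWordAt word k) := by
              push_neg
              exact ⟨by omega, by omega, by omega, hmatch⟩
            rw [find_word_diagonal, dif_neg hguard]
            by_cases hlast : k = PySem.Str.len word - 1
            · rw [if_pos hlast]
              rw [find_word_diagonal_alt, if_neg (by push_neg; refine ⟨by omega, by omega, by omega⟩)]
              have h1 : PySem.Str.len word - k = 1 := by omega
              rw [h1]
              rw [show PySem.List.pyRange 0 1 1 = [0] from PySem.List.pyRange_one_singleton 0]
              simp [hmatch]
            · rw [if_neg hlast]
              rw [ih (i+1) (j+1) (k+1) (by omega) (by omega) (by omega) (by omega)]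
              by_cases hb : i + (PySem.Str.len word - k) > (matrix.length : Int) ∨
                  j + (PySem.Str.len word - k) > ((PySem.List.pyGetD matrix 0 []).length : Int)
              · rw [find_word_diagonal_alt, if_pos (by omega)]
                rw [find_word_diagonal_alt, if_pos (by omega)]
              · rw [find_word_diagonal_alt, if_neg (by omega)]
                rw [find_word_diagonal_alt, if_neg (by omega)]
                rw [pv_all_pyRange_shift _ _ hn]
                have h0 : decide (pvCell matrix (i+0) (j+0) = pvWordAt word (k+0)) = true := by
                  simp [hmatch]
                rw [h0, Bool.true_and]
                have hsub : PySem.Str.len word - k - 1 = PySem.Str.len word - (k+1) := by ring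
                rw [hsub]
                apply pv_all_ext
                intro t
                have e1 : i + (t + 1) = i + 1 + t := by ring
                have e2 : j + (t + 1) = j + 1 + t := by ring
                have e3 : k + (t + 1) = k + 1 + t := by ring
                rw [e1, e2, e3]
          · rw [find_word_diagonal, dif_pos (Or.inr (Or.inr (Or.inr hmatch)))]
            rw [find_word_diagonal_alt]
            by_cases hb : (PySem.Str.len word - k) ≤ 0 ∨ i + (PySem.Str.len word - k) > (matrix.length : Int) ∨
                j + (PySem.Str.len word - k) > ((PySem.List.pyGetD matrix 0 []).length : Int)
            · rw [if_pos hb]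
            · rw [if_neg hb]
              symm
              rw [List.all_eq_false]
              refine ⟨0, ?_, ?_⟩
              · rw [PySem.List.mem_pyRange_one]
                omega
              · simp [hmatch]

-- both sides return False whenever a cursor is already past its bound
theorem pv_false (matrix : List (List String)) (word : String) (i j k : Int)
    (h : i ≥ (matrix.length : Int) ∨ j ≥ ((PySem.List.pyGetD matrix 0 []).length : Int) ∨
         k ≥ PySem.Str.len word) :
    find_word_diagonal matrix word i j k = find_word_diagonal_alt matrix word i j k := by
  rw [find_word_diagonal, dif_pos (by tauto)]
  rw [find_word_diagonal_alt]
  by_cases hkL : PySem.Str.len word ≤ k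
  · rw [if_pos (Or.inl (by omega))]
  · rw [if_pos (by omega)]

-- ===== VERDICT (by name: the statement is the Claim_ definition above) =====
theorem find_word_diagonal_spec : Claim_equal_find_word_diagonal := by
  intro matrix word i j k _hdom hpre
  rcases hpre with ⟨hi, hj, hk, -⟩ | him | ⟨-, hjc⟩ | ⟨hkL, -⟩
  · exact pv_main matrix word (PySem.Str.len word - k).toNat i j k hi hj hk le_rfl
  · exact pv_false matrix word i j k (Or.inl him)
  · exact pv_false matrix word i j k (Or.inr (Or.inl hjc))
  · exact pv_false matrix word i j k (Or.inr (Or.inr hkL))
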